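-- pv_equiv track=rewrite | github.com/gregvanhoudt/AITIA-PM | Inference.py | count_effect
-- ===== SOURCE A (Python) =====
-- def count_effect(e_trues, windows) -> int:
--     """
--     Get the number of times where e is true in the provided time windows.
--
--     Parameters:
--         e_trues: the timepoints where e is true.
--         windows: a list of windows, i.e. c_and_x and not_c_and_x.
--
--     Returns:
--         The number of times (Int) e was true in the provided time windows.
--     """
--     res = 0
--
--     for (ws, we), intersection in windows:
--         for e in e_trues:
--             e_cases = e_trues[e]
--             inter = [e_case for e_case in e_cases if e_case in intersection]
--             if e >= ws and e <= we and len(inter) != 0: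
--                 res += 1
--                 break
--
--     return(res)
-- ===== SOURCE B (Python) =====
-- def _bsearch(keys, x, right):
--     """Index of the first key not < x (right=False) / not <= x (right=True)."""
--     lo, hi = 0, len(keys)
--     while lo < hi:
--         mid = (lo + hi) // 2
--         v = keys[mid]
--         if v < x or (right and v == x):
--             lo = mid + 1
--         else:
--             hi = mid
--     return lo
--
--
-- def count_effect(e_trues, windows) -> int:
--     # Build a key-sorted index of e_trues once; per window, binary-search the
--     # key range [ws, we] and scan only that sub-range against a set of the
--     # window's intersection.
--     items = sorted(e_trues.items(), key=lambda kv: kv[0])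
--     keys = [kv[0] for kv in items]
--     res = 0
--     for (ws, we), intersection in windows:
--         inter_set = set(intersection)
--         lo = _bsearch(keys, ws, False)
--         hi = _bsearch(keys, we, True)
--         if any(any(c in inter_set for c in cases) for _, cases in items[lo:hi]):
--             res += 1
--     return res
-- ===== Notes on version B (the rewrite author's own statement) =====
-- stated objective: faster
-- what changed: B builds a key-sorted index of e_trues once and, per window, binary-searches the key range [ws,we] and scans only that sub-range against a hash set of the intersection, instead of scanning every key and list-scanning the intersection for each case.
import Mathlib
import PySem

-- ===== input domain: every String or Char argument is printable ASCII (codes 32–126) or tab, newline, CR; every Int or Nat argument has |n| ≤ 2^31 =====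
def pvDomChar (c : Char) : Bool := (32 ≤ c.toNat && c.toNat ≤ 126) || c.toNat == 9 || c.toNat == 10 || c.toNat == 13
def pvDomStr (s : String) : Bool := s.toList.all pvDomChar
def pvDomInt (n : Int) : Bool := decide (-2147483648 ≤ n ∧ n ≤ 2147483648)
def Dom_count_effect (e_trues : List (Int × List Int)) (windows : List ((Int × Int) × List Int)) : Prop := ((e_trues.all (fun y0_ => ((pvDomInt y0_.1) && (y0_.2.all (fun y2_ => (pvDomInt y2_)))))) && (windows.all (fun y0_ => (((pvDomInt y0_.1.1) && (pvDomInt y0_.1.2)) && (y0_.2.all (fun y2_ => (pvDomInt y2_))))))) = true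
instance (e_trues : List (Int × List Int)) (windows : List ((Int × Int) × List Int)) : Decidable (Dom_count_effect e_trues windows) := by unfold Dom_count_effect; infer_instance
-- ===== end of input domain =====

-- B replaces A's per-window scan of every key (with a list scan of the intersection for
-- each case) by a key-sorted index built once, a binary search isolating the keys in
-- [ws, we] per window, and a set for the intersection membership test.

-- ===== PORT A =====
-- A's inner 'for e in e_trues: ... break' over the dict's keys (first hit stops the scan)
def countEffectInnerA (d : PySem.Dict Int (List Int)) (ws we : Int) (intersection : List Int) : List Int → Bool
  | [] => false
  | e :: rest =>
      let e_cases := d.getD e []   -- e_trues[e]: e is a key of d, so the default is never used (no KeyError)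
      let inter := e_cases.filter (fun c => decide (c ∈ intersection))
      if e ≥ ws ∧ e ≤ we ∧ inter.length ≠ 0 then true
      else countEffectInnerA d ws we intersection rest

def count_effect (e_trues : List (Int × List Int)) (windows : List ((Int × Int) × List Int)) : Int :=
  let d := PySem.Dict.ofList e_trues
  windows.foldl (fun res wi =>
    if countEffectInnerA d wi.1.1 wi.1.2 wi.2 d.keys then res + 1 else res) 0

-- ===== PORT B =====
-- B's hand-written binary search (the 'while lo < hi' loop of _bsearch in Source B;
-- the Python locals mid and v are written inline, same computation step for step;
-- keys[mid] is in range at every call since lo ≤ mid < hi ≤ len(keys);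
-- the fuel argument only makes the while loop structural: hi - lo shrinks each
-- iteration, so fuel = len(keys) ≥ hi - lo is never exhausted)
def bsearchB (keys : List Int) (x : Int) (right : Bool) : Nat → Nat → Nat → Nat
  | 0, lo, _hi => lo
  | fuel + 1, lo, hi =>
    if lo < hi then
      if keys.getD ((lo + hi) / 2) 0 < x ∨ (right = true ∧ keys.getD ((lo + hi) / 2) 0 = x) then
        bsearchB keys x right fuel ((lo + hi) / 2 + 1) hi
      else bsearchB keys x right fuel lo ((lo + hi) / 2)
    else lo

def count_effect_alt (e_trues : List (Int × List Int)) (windows : List ((Int × Int) × List Int)) : Int :=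
  let items := PySem.List.sorted (PySem.Dict.ofList e_trues).items (fun kv => kv.1) false
  let keys := items.map (fun kv => kv.1)
  windows.foldl (fun res wi =>
    let interSet := PySem.Set.ofList wi.2
    let lo := bsearchB keys wi.1.1 false keys.length 0 keys.length
    let hi := bsearchB keys wi.1.2 true keys.length 0 keys.length
    if (PySem.List.slice items (some (lo : Int)) (some (hi : Int))).any
         (fun kv => kv.2.any (fun c => PySem.Set.contains interSet c)) then res + 1 else res) 0

-- ===== PRECONDITION & SPEC =====
def Spec_count_effect (e_trues : List (Int × List Int)) (windows : List ((Int × Int) × List Int)) (out : Int) : Prop := out = count_effect_alt e_trues windows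
instance (e_trues : List (Int × List Int)) (windows : List ((Int × Int) × List Int)) (out : Int) : Decidable (Spec_count_effect e_trues windows out) := by unfold Spec_count_effect; infer_instance

-- ===== CLAIM (what is proved, stated in full; the proofs are below) =====
def Claim_equal_count_effect : Prop := ∀ (e_trues : List (Int × List Int)) (windows : List ((Int × Int) × List Int)), Dom_count_effect e_trues windows → Spec_count_effect e_trues windows (count_effect e_trues windows)

-- ===== LEMMAS AND PROOFS =====

-- A's break-scan is an existence test over the keys
lemma innerA_eq_any (d : PySem.Dict Int (List Int)) (ws we : Int) (inter : List Int) (l : List Int) :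
    countEffectInnerA d ws we inter l
      = l.any (fun e => decide ((ws ≤ e ∧ e ≤ we) ∧ ∃ c ∈ d.getD e [], c ∈ inter)) := by
  induction l with
  | nil => rfl
  | cons e rest ih =>
    have hiff : (e ≥ ws ∧ e ≤ we ∧ ((d.getD e []).filter (fun c => decide (c ∈ inter))).length ≠ 0)
        ↔ ((ws ≤ e ∧ e ≤ we) ∧ ∃ c ∈ d.getD e [], c ∈ inter) := by
      constructor
      · rintro ⟨h1, h2, h3⟩
        refine ⟨⟨h1, h2⟩, ?_⟩
        have hne : (d.getD e []).filter (fun c => decide (c ∈ inter)) ≠ [] := fun hh => h3 (by simp [hh])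
        obtain ⟨c, hc⟩ := List.exists_mem_of_ne_nil _ hne
        simp only [List.mem_filter, decide_eq_true_eq] at hc
        exact ⟨c, hc.1, hc.2⟩
      · rintro ⟨⟨h1, h2⟩, c, hc, hci⟩
        refine ⟨h1, h2, fun hlen => ?_⟩
        rw [List.length_eq_zero_iff] at hlen
        have hcm : c ∈ (d.getD e []).filter (fun c => decide (c ∈ inter)) := by
          simp [List.mem_filter, hc, hci]
        simp [hlen] at hcm
    simp only [countEffectInnerA, List.any_cons, ← ih]
    by_cases h : (ws ≤ e ∧ e ≤ we) ∧ ∃ c ∈ d.getD e [], c ∈ inter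
    · rw [if_pos (hiff.mpr h)]; simp [h]
    · rw [if_neg (fun hh => h (hiff.mp hh))]; simp [h]

-- boundary invariant of B's binary search on any segment [lo, hi) with enough fuel
lemma bsearchB_invariant (keys : List Int) (x : Int) (right : Bool) (fuel lo hi : Nat)
    (hf : hi - lo ≤ fuel)
    (hhi : hi ≤ keys.length) (hlh : lo ≤ hi)
    (hL : 0 < lo → (keys.getD (lo - 1) 0 < x ∨ (right = true ∧ keys.getD (lo - 1) 0 = x)))
    (hR : hi < keys.length → ¬ (keys.getD hi 0 < x ∨ (right = true ∧ keys.getD hi 0 = x))) :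
    lo ≤ bsearchB keys x right fuel lo hi ∧ bsearchB keys x right fuel lo hi ≤ hi ∧
    (0 < bsearchB keys x right fuel lo hi →
      (keys.getD (bsearchB keys x right fuel lo hi - 1) 0 < x ∨ (right = true ∧ keys.getD (bsearchB keys x right fuel lo hi - 1) 0 = x))) ∧
    (bsearchB keys x right fuel lo hi < keys.length →
      ¬ (keys.getD (bsearchB keys x right fuel lo hi) 0 < x ∨ (right = true ∧ keys.getD (bsearchB keys x right fuel lo hi) 0 = x))) := by
  induction fuel generalizing lo hi with
  | zero =>
    have heq : lo = hi := by omega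
    simp only [bsearchB]
    exact ⟨le_refl _, hlh, hL, fun hlen => heq ▸ hR (heq ▸ hlen)⟩
  | succ fuel ih =>
    by_cases h : lo < hi
    · by_cases htest : keys.getD ((lo + hi) / 2) 0 < x ∨ (right = true ∧ keys.getD ((lo + hi) / 2) 0 = x)
      · rw [bsearchB, if_pos h, if_pos htest]
        have key := ih ((lo + hi) / 2 + 1) hi (by omega) hhi (by omega)
          (fun _ => by simpa using htest) hR
        exact ⟨by omega, key.2.1, key.2.2.1, key.2.2.2⟩
      · rw [bsearchB, if_pos h, if_neg htest]
        have key := ih lo ((lo + hi) / 2) (by omega) (by omega) (by omega) hL (fun _ => htest)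
        exact ⟨key.1, by omega, key.2.2.1, key.2.2.2⟩
    · rw [bsearchB, if_neg h]
      have heq : lo = hi := by omega
      exact ⟨le_refl _, hlh, hL, fun hlen => heq ▸ hR (heq ▸ hlen)⟩

-- on a sorted list the whole-list search separates the list at the predicate's boundary
lemma bsearchB_global (keys : List Int) (x : Int) (right : Bool)
    (hs : keys.Pairwise (· ≤ ·)) (j : Nat) (hj : j < keys.length) :
    j < bsearchB keys x right keys.length 0 keys.length
      ↔ (keys[j] < x ∨ (right = true ∧ keys[j] = x)) := by
  obtain ⟨-, hle, hLres, hRres⟩ :=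
    bsearchB_invariant keys x right keys.length 0 keys.length (by omega) (le_refl _) (Nat.zero_le _)
      (by omega) (by omega)
  set r := bsearchB keys x right keys.length 0 keys.length with hr
  have hmono : ∀ p q (hp : p < keys.length) (hq : q < keys.length), p ≤ q →
      (keys[q] < x ∨ (right = true ∧ keys[q] = x)) → (keys[p] < x ∨ (right = true ∧ keys[p] = x)) := by
    intro p q hp hq hpq hQ
    have hle2 : keys[p] ≤ keys[q] := by
      rcases Nat.lt_or_ge p q with hlt | hge
      · exact (List.pairwise_iff_getElem.mp hs) p q hp hq hlt
      · have : p = q := by omega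
        subst this; exact le_refl _
    rcases hQ with h1 | ⟨hrt, h2⟩
    · by_cases hR2 : right = true
      · rcases lt_or_eq_of_le (le_trans hle2 (le_of_lt h1)) with h | h
        · exact Or.inl h
        · exact Or.inr ⟨hR2, h⟩
      · exact Or.inl (lt_of_le_of_lt hle2 h1)
    · subst h2
      rcases lt_or_eq_of_le (le_trans hle2 (le_refl _)) with h | h
      · exact Or.inl h
      · exact Or.inr ⟨hrt, h⟩
  constructor
  · intro hjr
    have hr0 : 0 < r := by omega
    have hrm : r - 1 < keys.length := by omega
    have hP := hLres hr0
    rw [List.getD_eq_getElem keys 0 hrm] at hP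
    exact hmono j (r - 1) hj hrm (by omega) hP
  · intro hP
    by_contra hge
    have hrlen : r < keys.length := by omega
    have hnP := hRres hrlen
    rw [List.getD_eq_getElem keys 0 hrlen] at hnP
    exact hnP (hmono r j hrlen hj (by omega) hP)

-- membership in items[lo:hi]
lemma mem_slice_iff {α : Type} (l : List α) (lo hi : Nat) (kv : α) :
    kv ∈ PySem.List.slice l (some (lo : Int)) (some (hi : Int))
      ↔ ∃ j, lo ≤ j ∧ j < hi ∧ ∃ hj : j < l.length, l[j] = kv := by
  rw [PySem.List.slice_natCast]
  constructor
  · intro hm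
    obtain ⟨i, hi2, hgi⟩ := List.getElem_of_mem hm
    have hlen : i < min (hi - lo) (l.length - lo) := by
      simpa [List.length_take, List.length_drop] using hi2
    rw [List.getElem_take, List.getElem_drop] at hgi
    exact ⟨lo + i, by omega, by omega, by omega, hgi⟩
  · rintro ⟨j, hlo, hhi2, hjl, hg⟩
    have h1 : j - lo < (l.drop lo).length := by simp [List.length_drop]; omega
    have h2 : j - lo < hi - lo := by omega
    have : ((l.drop lo).take (hi - lo))[j - lo]'(by simp [List.length_take]; omega) = kv := by
      rw [List.getElem_take, List.getElem_drop]
      have : lo + (j - lo) = j := by omega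
      simp [this, hg]
    exact this ▸ List.getElem_mem _

-- the per-window conditions of A and B coincide
lemma window_eq (e_trues : List (Int × List Int)) (ws we : Int) (inter : List Int) :
    countEffectInnerA (PySem.Dict.ofList e_trues) ws we inter (PySem.Dict.ofList e_trues).keys
      = (PySem.List.slice (PySem.List.sorted (PySem.Dict.ofList e_trues).items (fun kv => kv.1) false)
          (some ((bsearchB ((PySem.List.sorted (PySem.Dict.ofList e_trues).items (fun kv => kv.1) false).map (fun kv => kv.1)) ws false ((PySem.List.sorted (PySem.Dict.ofList e_trues).items (fun kv => kv.1) false).map (fun kv => kv.1)).length 0 ((PySem.List.sorted (PySem.Dict.ofList e_trues).items (fun kv => kv.1) false).map (fun kv => kv.1)).length : Nat) : Int))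
          (some ((bsearchB ((PySem.List.sorted (PySem.Dict.ofList e_trues).items (fun kv => kv.1) false).map (fun kv => kv.1)) we true ((PySem.List.sorted (PySem.Dict.ofList e_trues).items (fun kv => kv.1) false).map (fun kv => kv.1)).length 0 ((PySem.List.sorted (PySem.Dict.ofList e_trues).items (fun kv => kv.1) false).map (fun kv => kv.1)).length : Nat) : Int))).any
          (fun kv => kv.2.any (fun c => PySem.Set.contains (PySem.Set.ofList inter) c)) := by
  rw [innerA_eq_any]
  set d := PySem.Dict.ofList e_trues with hd
  set items := PySem.List.sorted d.items (fun kv => kv.1) false with hitems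
  set keys := items.map (fun kv => kv.1) with hkeys
  set lo := bsearchB keys ws false keys.length 0 keys.length with hlo
  set hi := bsearchB keys we true keys.length 0 keys.length with hhi
  have hnd : d.keys.Nodup := PySem.Dict.nodup_keys_ofList e_trues
  have hpw : keys.Pairwise (· ≤ ·) := PySem.List.sorted_map_key_pairwise d.items (fun kv => kv.1)
  have hlen : keys.length = items.length := by simp [hkeys]
  have hkj : ∀ (j : Nat) (hj : j < items.length), keys[j]'(by omega) = (items[j]).1 := by
    intro j hj; simp only [hkeys, List.getElem_map]
  have hSmem : ∀ c : Int, (PySem.Set.contains (PySem.Set.ofList inter) c = true) ↔ c ∈ inter := by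
    intro c
    simp [PySem.Set.contains, PySem.Set.mem_ofList]
  rw [Bool.eq_iff_iff]
  simp only [List.any_eq_true, decide_eq_true_eq]
  constructor
  · rintro ⟨e, he, ⟨h1, h2⟩, c, hc, hci⟩
    obtain ⟨v, hv⟩ : ∃ v, d.get? e = some v := by
      cases hget : d.get? e with
      | none => exact absurd ((PySem.Dict.get?_eq_none_iff_not_mem_keys d e).mp hget) (by simpa using he)
      | some v => exact ⟨v, rfl⟩
    have hgd : d.getD e [] = v := PySem.Dict.getD_of_get?_eq_some d [] hv
    have hmi : (e, v) ∈ d.items := (PySem.Dict.get?_eq_some_iff_mem_items d e v hnd).mp hv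
    have hms : (e, v) ∈ items := by rw [hitems, PySem.List.mem_sorted]; exact hmi
    obtain ⟨j, hjlen, hgj⟩ := List.getElem_of_mem hms
    have hkey : keys[j]'(by omega) = e := by rw [hkj j hjlen, hgj]
    have hjlo : ¬ (j < lo) := by
      rw [hlo, bsearchB_global keys ws false hpw j (by omega), hkey]
      simp; omega
    have hjhi : j < hi := by
      rw [hhi, bsearchB_global keys we true hpw j (by omega), hkey]
      rcases lt_or_eq_of_le h2 with h | h
      · exact Or.inl h
      · exact Or.inr ⟨rfl, h⟩
    exact ⟨(e, v), (mem_slice_iff items lo hi (e, v)).mpr ⟨j, by omega, hjhi, hjlen, hgj⟩,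
      c, by rwa [hgd] at hc, (hSmem c).mpr hci⟩
  · rintro ⟨kv, hkvs, hg⟩
    obtain ⟨j, hjlo, hjhi, hjlen, hgj⟩ := (mem_slice_iff items lo hi kv).mp hkvs
    have hkey : keys[j]'(by omega) = kv.1 := by rw [hkj j hjlen, hgj]
    have hrange : ws ≤ kv.1 ∧ kv.1 ≤ we := by
      have h1 : ¬ (j < lo) := by omega
      rw [hlo, bsearchB_global keys ws false hpw j (by omega), hkey] at h1
      have h2 : j < hi := hjhi
      rw [hhi, bsearchB_global keys we true hpw j (by omega), hkey] at h2
      constructor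
      · simp at h1; omega
      · rcases h2 with h | ⟨-, h⟩
        · omega
        · omega
    have hmi : kv ∈ d.items := by
      rw [← PySem.List.mem_sorted d.items (fun kv => kv.1) false, ← hitems]
      exact hgj ▸ List.getElem_mem _
    have hke : kv.1 ∈ d.keys := PySem.Dict.mem_keys_of_mem_items d hmi
    have hgd : d.getD kv.1 [] = kv.2 := by
      have : (kv.1, kv.2) ∈ d.items := by simpa using hmi
      exact PySem.Dict.getD_of_mem_items d this hnd []
    obtain ⟨c, hc, hcs⟩ := hg
    exact ⟨kv.1, hke, hrange, c, by rwa [hgd], (hSmem c).mp hcs⟩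

-- ===== VERDICT (by name: the statement is the Claim_ definition above) =====
theorem count_effect_spec : Claim_equal_count_effect := by
  intro e_trues windows _
  unfold Spec_count_effect count_effect count_effect_alt
  simp only
  simp only [window_eq e_trues]
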